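-- pv_equiv track=rewrite | github.com/JinalDevadiga/agent-code-review-system | data/benchmarks/sample.py | matrix_operation
-- ===== SOURCE A (Python) =====
-- def matrix_operation(matrix):
--     result = []
--     for i in range(len(matrix)):
--         for j in range(len(matrix[0])):
--             for k in range(len(matrix)):
--                 val = matrix[i][j] * matrix[k][j]
--                 result.append(val)
--     return result
-- ===== SOURCE B (Python) =====
-- def matrix_operation(matrix):
--     if not matrix:
--         return []
--     n = len(matrix)
--     # Stage 1: one flattened outer product (Gram block) per column.
--     outers = []
--     for j in range(len(matrix[0])):
--         col = [matrix[k][j] for k in range(n)]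
--         outers.append([a * b for a in col for b in col])
--     # Stage 2: reassemble the output by slicing row-i chunks out of each block.
--     out = []
--     for i in range(n):
--         for o in outers:
--             out.extend(o[i * n:i * n + n])
--     return out
-- ===== Notes on version B (the rewrite author's own statement) =====
-- stated objective: alternative
-- what changed: B is a two-stage algorithm: it first computes, per column, the flattened outer product (Gram block) of that column with itself, and then reassembles the output by slicing the i-th n-chunk out of each block, instead of A's single triple index loop that emits products directly in order.
import Mathlib
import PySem

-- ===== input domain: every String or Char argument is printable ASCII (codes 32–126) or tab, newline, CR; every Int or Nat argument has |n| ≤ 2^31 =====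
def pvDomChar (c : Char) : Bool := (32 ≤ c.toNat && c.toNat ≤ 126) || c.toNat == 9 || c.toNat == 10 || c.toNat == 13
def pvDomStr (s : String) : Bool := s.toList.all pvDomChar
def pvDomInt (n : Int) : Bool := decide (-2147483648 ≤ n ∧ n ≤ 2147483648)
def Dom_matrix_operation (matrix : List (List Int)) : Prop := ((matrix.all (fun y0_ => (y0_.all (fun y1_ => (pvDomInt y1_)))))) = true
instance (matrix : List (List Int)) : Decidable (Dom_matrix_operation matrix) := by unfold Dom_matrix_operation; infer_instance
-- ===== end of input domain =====

-- B computes per-column flattened outer-product blocks in a first pass and then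
-- reassembles the output by slicing row chunks out of those blocks; objective:
-- alternative two-stage algorithm, same cost.

-- ===== PORT A =====
-- literal port of A's triple index loop; getD is exact under Pre_ (all indices in range)
def matrix_operation (matrix : List (List Int)) : List Int :=
  (List.range matrix.length).foldl (fun result i =>
    (List.range (matrix.headD []).length).foldl (fun result j =>
      (List.range matrix.length).foldl (fun result k =>
        result ++ [((matrix.getD i []).getD j 0) * ((matrix.getD k []).getD j 0)]) result) result) []

-- ===== PORT B =====
-- literal port of Source B; matrix[k][j] is getD (exact under Pre_), o[i*n:i*n+n] is PySem.List.slice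
def matrix_operation_alt (matrix : List (List Int)) : List Int :=
  match matrix with
  | [] => []
  | m0 :: _ =>
    let n := matrix.length
    let outers := (List.range m0.length).foldl (fun outers j =>
      let col := (List.range n).map (fun k => (matrix.getD k []).getD j 0)
      outers ++ [col.flatMap (fun a => col.map (fun b => a * b))]) []
    (List.range n).foldl (fun out i =>
      outers.foldl (fun out o =>
        out ++ PySem.List.slice o (some ((i * n : ℕ) : Int)) (some (((i * n : ℕ) : Int) + ((n : ℕ) : Int)))) out) []

-- ===== PRECONDITION & SPEC =====
-- Pre_ excludes exactly the ragged matrices with a row shorter than row 0, on which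
-- the Python A raises IndexError (B raises there too).
def Pre_matrix_operation (matrix : List (List Int)) : Prop :=
  ∀ row ∈ matrix, (matrix.headD []).length ≤ row.length
instance (matrix : List (List Int)) : Decidable (Pre_matrix_operation matrix) := by
  unfold Pre_matrix_operation; infer_instance
def pvWitness_matrix_operation : List (List Int) := [[1, 2], [3, 4]]
def Spec_matrix_operation (matrix : List (List Int)) (out : List Int) : Prop := out = matrix_operation_alt matrix
instance (matrix : List (List Int)) (out : List Int) : Decidable (Spec_matrix_operation matrix out) := by unfold Spec_matrix_operation; infer_instance

-- ===== CLAIM (what is proved, stated in full; the proofs are below) =====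
def Claim_equal_matrix_operation : Prop := ∀ (matrix : List (List Int)), Dom_matrix_operation matrix → Pre_matrix_operation matrix → Spec_matrix_operation matrix (matrix_operation matrix)

-- ===== LEMMAS AND PROOFS =====

-- range over length picks out the elements
theorem map_getD_range {α : Type} (l : List α) (d : α) :
    (List.range l.length).map (fun i => l.getD i d) = l := by
  induction l with
  | nil => simp
  | cons a l ih =>
    simp only [List.length_cons, List.range_succ_eq_map, List.map_cons, List.map_map]
    simpa using ih

theorem flatMap_range_getD {α β : Type} (l : List α) (d : α) (f : α → List β) :
    (List.range l.length).flatMap (fun i => f (l.getD i d)) = l.flatMap f := by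
  conv_rhs => rw [← map_getD_range l d]
  rw [List.flatMap_map]

theorem flatMap_single {α β : Type} (l : List α) (f : α → β) :
    l.flatMap (fun x => [f x]) = l.map f := by
  induction l with
  | nil => rfl
  | cons a l ih => simp [ih]

-- A in flatMap form
theorem matrix_operation_eq_flatMap (matrix : List (List Int)) :
    matrix_operation matrix =
      matrix.flatMap (fun rowi =>
        (List.range (matrix.headD []).length).flatMap (fun j =>
          matrix.map (fun rowk => rowi.getD j 0 * rowk.getD j 0))) := by
  unfold matrix_operation
  simp only [PySem.List.foldl_append_eq_flatMap, List.nil_append]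
  calc (List.range matrix.length).flatMap (fun i =>
          (List.range (matrix.headD []).length).flatMap (fun j =>
            (List.range matrix.length).flatMap (fun k =>
              [(matrix.getD i []).getD j 0 * (matrix.getD k []).getD j 0])))
      = matrix.flatMap (fun rowi =>
          (List.range (matrix.headD []).length).flatMap (fun j =>
            (List.range matrix.length).flatMap (fun k =>
              [rowi.getD j 0 * (matrix.getD k []).getD j 0]))) :=
        flatMap_range_getD matrix [] (fun rowi =>
          (List.range (matrix.headD []).length).flatMap (fun j =>
            (List.range matrix.length).flatMap (fun k =>
              [rowi.getD j 0 * (matrix.getD k []).getD j 0])))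
    _ = _ := by
        refine List.flatMap_congr (fun rowi _ => ?_)
        refine List.flatMap_congr (fun j _ => ?_)
        rw [flatMap_range_getD matrix [] (fun rowk => [rowi.getD j 0 * rowk.getD j 0]),
          flatMap_single]

-- slicing the i-th uniform-length chunk out of a flatMap
theorem chunk_of_flatMap {α β : Type} (l : List α) (f : α → List β) (n : ℕ)
    (h : ∀ a ∈ l, (f a).length = n) :
    ∀ (i : ℕ), i < l.length → ∀ (d : α),
      ((l.flatMap f).drop (i * n)).take n = f (l.getD i d) := by
  induction l with
  | nil => intro i hi; simp at hi
  | cons a tl ih =>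
    intro i hi d
    cases i with
    | zero =>
      simp only [Nat.zero_mul, List.drop_zero, List.flatMap_cons, List.getD_cons_zero]
      exact List.take_left' (h a List.mem_cons_self)
    | succ i =>
      have ha : (f a).length = n := h a List.mem_cons_self
      have key : ((f a ++ tl.flatMap f).drop ((i + 1) * n)) = (tl.flatMap f).drop (i * n) := by
        have hn : (i + 1) * n = (f a).length + i * n := by rw [ha]; ring
        rw [hn, List.drop_append]
        have h1 : List.drop ((f a).length + i * n) (f a) = [] :=
          List.drop_eq_nil_of_le (Nat.le_add_right _ _)
        rw [h1, List.nil_append, Nat.add_sub_cancel_left]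
      rw [List.flatMap_cons, key, List.getD_cons_succ]
      exact ih (fun a' ha' => h a' (List.mem_cons_of_mem _ ha')) i (by simpa using hi) d

-- the range-indexed column equals the mapped column
theorem col_eq_map (M : List (List Int)) (j : ℕ) :
    (List.range M.length).map (fun k => (M.getD k []).getD j 0)
      = M.map (fun row => row.getD j 0) := by
  conv_rhs => rw [← map_getD_range M []]
  rw [List.map_map]
  simp [Function.comp]

-- a loop that appends inside a nested loop is a double flatMap
theorem foldl_foldl_append {α β γ : Type} (l1 : List α) (l2 : List β)
    (f : α → β → List γ) (init : List γ) :
    l1.foldl (fun out i => l2.foldl (fun out o => out ++ f i o) out) init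
      = init ++ l1.flatMap (fun i => l2.flatMap (fun o => f i o)) := by
  induction l1 generalizing init with
  | nil => simp
  | cons a t ih => simp [List.append_assoc, List.flatMap_def]

-- the column table entry at row i
theorem col_getD (matrix : List (List Int)) (j i : ℕ) (hi : i < matrix.length) :
    (((List.range matrix.length).map (fun k => (matrix.getD k []).getD j 0)).getD i 0)
      = (matrix.getD i []).getD j 0 := by
  simp [List.getD, hi]

theorem matrix_operation_spec' (matrix : List (List Int)) :
    matrix_operation matrix = matrix_operation_alt matrix := by
  rw [matrix_operation_eq_flatMap]
  unfold matrix_operation_alt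
  match matrix with
  | [] => simp
  | m0 :: rest =>
    simp only [List.headD_cons]
    -- stage 1 of B: the foldl-append build of outers is a map over range
    rw [PySem.List.foldl_append_eq_flatMap, List.nil_append, flatMap_single,
      foldl_foldl_append, List.nil_append]
    -- both sides as flatMap over the rows / row indices
    rw [← flatMap_range_getD (m0 :: rest) [] (fun rowi =>
      (List.range m0.length).flatMap (fun j =>
        (m0 :: rest).map (fun rowk => rowi.getD j 0 * rowk.getD j 0)))]
    refine List.flatMap_congr (fun i hi => ?_)
    rw [List.flatMap_map]
    refine List.flatMap_congr (fun j hj => ?_)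
    have hi' : i < (m0 :: rest).length := List.mem_range.mp hi
    rw [PySem.List.slice_natCast_add]
    rw [chunk_of_flatMap
        ((List.range (m0 :: rest).length).map (fun k => ((m0 :: rest).getD k []).getD j 0))
        (fun a => ((List.range (m0 :: rest).length).map
          (fun k => ((m0 :: rest).getD k []).getD j 0)).map (fun b => a * b))
        (m0 :: rest).length (by intro a _; simp) i (by simpa using hi') (0 : Int)]
    rw [col_getD (m0 :: rest) j i hi', col_eq_map (m0 :: rest) j, List.map_map]
    simp [Function.comp]

-- ===== VERDICT (by name: the statement is the Claim_ definition above) =====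
theorem matrix_operation_spec : Claim_equal_matrix_operation := by
  intro matrix _ _
  exact matrix_operation_spec' matrix
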